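-- pv_equiv track=rewrite | github.com/matthew-pisano/ChipFiring | src/main.py | wheelJacs
-- ===== SOURCE A (Python) =====
-- def wheelJacs(n):
--     if n == 0:
--         return 4, 4
--     elif n == 1:
--         return 3, 15
--
--     if n % 2 == 0:
--         num = 5 * wheelJacs(n - 1)[0] - wheelJacs(n - 2)[0]
--         return num, num
--     num = wheelJacs(n - 1)[0] - wheelJacs(n - 2)[0]
--     return num, 5 * num
-- ===== SOURCE B (Python) =====
-- def wheelJacs(n):
--     if n == 0:
--         return 4, 4
--     if n == 1:
--         return 3, 15
--     prev2, prev1 = 4, 3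
--     for i in range(2, n + 1):
--         cur = 5 * prev1 - prev2 if i % 2 == 0 else prev1 - prev2
--         prev2, prev1 = prev1, cur
--     return (prev1, prev1) if n % 2 == 0 else (prev1, 5 * prev1)
-- ===== Notes on version B (the rewrite author's own statement) =====
-- stated objective: faster
-- what changed: Replaced the exponential double recursion over (n-1, n-2) by a single forward loop keeping only the previous two first components (iterative DP); intended as faster (O(n) vs O(2^n)), though A times out on larger inputs so a timing run could not confirm the speedup.
import Mathlib
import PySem

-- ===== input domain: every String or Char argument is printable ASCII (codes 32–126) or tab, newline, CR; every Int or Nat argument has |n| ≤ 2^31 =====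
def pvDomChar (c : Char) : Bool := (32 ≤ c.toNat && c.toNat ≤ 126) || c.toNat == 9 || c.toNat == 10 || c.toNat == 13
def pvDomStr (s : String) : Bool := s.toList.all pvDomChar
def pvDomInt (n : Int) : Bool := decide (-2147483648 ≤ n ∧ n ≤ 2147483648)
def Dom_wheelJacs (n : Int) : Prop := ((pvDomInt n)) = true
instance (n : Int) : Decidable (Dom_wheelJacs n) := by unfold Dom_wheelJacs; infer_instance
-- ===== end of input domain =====

-- B replaces A's exponential double recursion by a forward loop over the previous two
-- first components (iterative DP); return value only (A returns a tuple, modelled as a 2-list).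

-- ===== PORT A =====
-- A's recursion, with fuel making it total in Lean; fuel n.toNat+1 suffices for n ≥ 0
-- (for n < 0 Python recurses forever — excluded by Pre_).
def wheelJacsAux : Nat → Int → Int × Int
  | 0, _ => (0, 0)
  | fuel+1, n =>
    if n = 0 then (4, 4)
    else if n = 1 then (3, 15)
    else if PySem.Int.mod n 2 = 0 then
      let num := 5 * (wheelJacsAux fuel (n - 1)).1 - (wheelJacsAux fuel (n - 2)).1
      (num, num)
    else
      let num := (wheelJacsAux fuel (n - 1)).1 - (wheelJacsAux fuel (n - 2)).1
      (num, 5 * num)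

def wheelJacs (n : Int) : List Int :=
  let p := wheelJacsAux (n.toNat + 1) n
  [p.1, p.2]

-- ===== PORT B =====
def wheelJacs_alt (n : Int) : List Int :=
  if n = 0 then [4, 4]
  else if n = 1 then [3, 15]
  else
    let st := (PySem.List.pyRange 2 (n + 1) 1).foldl
      (fun (st : Int × Int) i =>
        (st.2, if PySem.Int.mod i 2 = 0 then 5 * st.2 - st.1 else st.2 - st.1))
      (4, 3)
    if PySem.Int.mod n 2 = 0 then [st.2, st.2] else [st.2, 5 * st.2]

-- ===== PRECONDITION & SPEC =====
-- A recurses forever (RecursionError) on negative n; Pre_ keeps exactly the n where it returns.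
def Pre_wheelJacs (n : Int) : Prop := 0 ≤ n
instance (n : Int) : Decidable (Pre_wheelJacs n) := by unfold Pre_wheelJacs; infer_instance
def pvWitness_wheelJacs : Int := (5)

def Spec_wheelJacs (n : Int) (out : List Int) : Prop := out = wheelJacs_alt n
instance (n : Int) (out : List Int) : Decidable (Spec_wheelJacs n out) := by unfold Spec_wheelJacs; infer_instance

-- ===== CLAIM (what is proved, stated in full; the proofs are below) =====
def Claim_equal_wheelJacs : Prop := ∀ (n : Int), Dom_wheelJacs n → Pre_wheelJacs n → Spec_wheelJacs n (wheelJacs n)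

-- ===== LEMMAS AND PROOFS =====

-- the first components of A's recursion, as a plain Nat recursion
def wheelF : Nat → Int
  | 0 => 4
  | 1 => 3
  | m+2 => if (m + 2) % 2 = 0 then 5 * wheelF (m+1) - wheelF m else wheelF (m+1) - wheelF m

lemma mod_cast_two (m : Nat) : PySem.Int.mod (m : Int) 2 = ((m % 2 : Nat) : Int) :=
  PySem.Int.mod_natCast m 2

lemma wheelF_step (m : Nat) :
    wheelF (m + 2) = if (m + 2) % 2 = 0 then 5 * wheelF (m+1) - wheelF m else wheelF (m+1) - wheelF m := rfl

lemma wheelJacsAux_eq (fuel m : Nat) (h : m < fuel) :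
    wheelJacsAux fuel (m : Int) =
      (wheelF m, if m % 2 = 0 then wheelF m else 5 * wheelF m) := by
  induction fuel generalizing m with
  | zero => omega
  | succ f ih =>
    match m with
    | 0 => simp [wheelJacsAux, wheelF]
    | 1 => norm_num [wheelJacsAux, wheelF]
    | m+2 =>
      have h1 : ((m:Int) + 2) - 1 = ((m + 1 : Nat) : Int) := by omega
      have h2 : ((m:Int) + 2) - 2 = ((m : Nat) : Int) := by omega
      have e1 := ih (m+1) (by omega)
      have e2 := ih m (by omega)
      have hm : PySem.Int.mod ((m:Int) + 2) 2 = (((m + 2) % 2 : Nat) : Int) := by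
        have := mod_cast_two (m + 2); push_cast at this ⊢; omega
      simp only [wheelJacsAux]
      have hne0 : ¬ ((m:Int) + 2 = 0) := by omega
      have hne1 : ¬ ((m:Int) + 2 = 1) := by omega
      push_cast
      rw [if_neg hne0, if_neg hne1, h1, h2, e1, e2]
      rcases Nat.even_or_odd m with he | ho
      · obtain ⟨t, rfl⟩ := he
        have p0 : (t + t) % 2 = 0 := by omega
        have p1 : (t + t + 1) % 2 = 1 := by omega
        have p2 : (t + t + 2) % 2 = 0 := by omega
        rw [hm, p2]
        norm_num [p0, p1]
        rw [wheelF_step, if_pos p2]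
      · obtain ⟨t, rfl⟩ := ho
        have p0 : (2 * t + 1) % 2 = 1 := by omega
        have p1 : (2 * t + 1 + 1) % 2 = 0 := by omega
        have p2 : (2 * t + 1 + 2) % 2 = 1 := by omega
        rw [hm, p2]
        norm_num [p0, p1]
        have q := wheelF_step (2*t+1)
        rw [if_neg (by omega)] at q
        rw [q]

lemma wheelLoop_eq (m : Nat) (h : 1 ≤ m) :
    (PySem.List.pyRange 2 ((m : Int) + 1) 1).foldl
      (fun (st : Int × Int) i =>
        (st.2, if PySem.Int.mod i 2 = 0 then 5 * st.2 - st.1 else st.2 - st.1))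
      (4, 3) = (wheelF (m - 1), wheelF m) := by
  induction m with
  | zero => omega
  | succ k ih =>
    rcases Nat.eq_zero_or_pos k with hk | hk
    · subst hk
      simp [wheelF]
    · have hr : PySem.List.pyRange 2 ((k:Int) + 1 + 1) 1
          = PySem.List.pyRange 2 ((k:Int) + 1) 1 ++ [(k:Int) + 1] :=
        PySem.List.pyRange_one_succ_right (by omega)
      push_cast
      rw [hr, List.foldl_append, ih hk]
      have hm : PySem.Int.mod ((k:Int) + 1) 2 = (((k + 1) % 2 : Nat) : Int) := by
        have := mod_cast_two (k + 1); push_cast at this ⊢; omega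
      simp only [List.foldl, hm]
      obtain ⟨j, rfl⟩ : ∃ j, k = j + 1 := ⟨k - 1, by omega⟩
      have hj2 : wheelF (j + 2) = if (j + 2) % 2 = 0 then 5 * wheelF (j+1) - wheelF j else wheelF (j+1) - wheelF j := wheelF_step j
      rcases Nat.mod_two_eq_zero_or_one (j + 2) with h0 | h0
      · have h0' : (j + 1 + 1) % 2 = 0 := by omega
        rw [h0']
        norm_num
        rw [show (j + 1 + 1) = j + 2 from rfl, hj2, if_pos h0]
      · have h0' : (j + 1 + 1) % 2 = 1 := by omega
        rw [h0']
        norm_num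
        rw [show (j + 1 + 1) = j + 2 from rfl, hj2, if_neg (by omega)]

-- ===== VERDICT (by name: the statement is the Claim_ definition above) =====
set_option maxRecDepth 4000 in
theorem wheelJacs_spec : Claim_equal_wheelJacs := by
  intro n _ hpre
  unfold Pre_wheelJacs at hpre
  obtain ⟨m, rfl⟩ : ∃ m : Nat, n = (m : Int) := ⟨n.toNat, by omega⟩
  unfold Spec_wheelJacs wheelJacs
  have htn : ((m : Int).toNat + 1) = m + 1 := by omega
  rw [htn, wheelJacsAux_eq (m+1) m (by omega)]
  rcases m with _ | (_ | k)
  · simp [wheelJacs_alt, wheelF]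
  · norm_num [wheelJacs_alt, wheelF]
  · have hc : ((k + 1 + 1 : Nat) : Int) = (k : Int) + 2 := by push_cast; ring
    rw [hc]
    unfold wheelJacs_alt
    have hne0 : ¬ ((k : Int) + 2 = 0) := by omega
    have hne1 : ¬ ((k : Int) + 2 = 1) := by omega
    rw [if_neg hne0, if_neg hne1]
    have hl := wheelLoop_eq (k+2) (by omega)
    push_cast at hl
    simp only [hl]
    have hm : PySem.Int.mod ((k : Int) + 2) 2 = (((k + 2) % 2 : Nat) : Int) := by
      have := mod_cast_two (k + 2); push_cast at this ⊢; omega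
    rw [hm]
    have hc2 : k + 1 + 1 = k + 2 := rfl
    rw [hc2]
    rcases Nat.mod_two_eq_zero_or_one (k + 2) with h0 | h0
    · rw [h0]; norm_num [h0]
    · rw [h0]
      norm_num [h0]
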